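-- pv_equiv track=rewrite | github.com/mrbartrns/algorithm-and-structure | programmers/lv2_review/lv2_1.py | solution
-- ===== SOURCE A (Python) =====
-- def solution(n):
--     string = ""
--     if n > 0:
--         if n % 3 == 0:
--             string = "4"
--         elif n % 3 == 1:
--             string = "1"
--         else:
--             string = "2"
--
--         if n % 3 > 0:
--             string = solution(n // 3) + string
--         else:
--             string = solution(n // 3 - 1) + string
--     return string
-- ===== SOURCE B (Python) =====
-- def solution(n):
--     digits = []
--     while n > 0:
--         r = n % 3
--         if r == 1:
--             digits.append("1")
--             n = n // 3
--         elif r == 2: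
--             digits.append("2")
--             n = n // 3
--         else:
--             digits.append("4")
--             n = n // 3 - 1
--     return "".join(reversed(digits))
-- ===== Notes on version B (the rewrite author's own statement) =====
-- stated objective: idiomatic
-- what changed: Replaced the string-prepending recursion with an iterative while-loop that collects digit characters in a list and joins them reversed at the end.
import Mathlib
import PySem

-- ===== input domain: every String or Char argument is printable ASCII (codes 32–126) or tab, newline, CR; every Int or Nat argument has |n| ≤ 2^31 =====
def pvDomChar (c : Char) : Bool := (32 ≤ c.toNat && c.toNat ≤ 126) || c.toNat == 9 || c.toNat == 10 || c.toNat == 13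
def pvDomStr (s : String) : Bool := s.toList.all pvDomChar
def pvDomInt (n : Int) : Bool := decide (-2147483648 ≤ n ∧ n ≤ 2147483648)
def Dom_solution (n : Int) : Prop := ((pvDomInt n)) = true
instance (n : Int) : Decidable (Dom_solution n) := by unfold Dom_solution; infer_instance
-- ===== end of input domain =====

-- B is a different decomposition of the same conversion: iterative digit collection + one join,
-- instead of A's recursion that prepends via repeated string concatenation.

-- termination helpers (cited by name in decreasing_by)
theorem pv_fd_lt (n : Int) (h : 0 < n) : (PySem.Int.floordiv n 3).toNat < n.toNat := by
  rw [PySem.Int.floordiv_eq_ediv_of_pos (by norm_num)]; omega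

theorem pv_fd1_lt (n : Int) (h : 0 < n) : (PySem.Int.floordiv n 3 - 1).toNat < n.toNat := by
  rw [PySem.Int.floordiv_eq_ediv_of_pos (by norm_num)]; omega

-- ===== PORT A =====
def solution (n : Int) : String :=
  if h : n > 0 then
    let string : String :=
      if PySem.Int.mod n 3 = 0 then "4"
      else if PySem.Int.mod n 3 = 1 then "1"
      else "2"
    if PySem.Int.mod n 3 > 0 then solution (PySem.Int.floordiv n 3) ++ string
    else solution (PySem.Int.floordiv n 3 - 1) ++ string
  else ""
termination_by n.toNat
decreasing_by
  · exact pv_fd_lt n h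
  · exact pv_fd1_lt n h

-- ===== PORT B =====
-- the while-loop of Source B: `digits` is the accumulated list (appended at the back)
def solutionLoop (n : Int) (digits : List String) : List String :=
  if h : n > 0 then
    if PySem.Int.mod n 3 = 1 then solutionLoop (PySem.Int.floordiv n 3) (digits ++ ["1"])
    else if PySem.Int.mod n 3 = 2 then solutionLoop (PySem.Int.floordiv n 3) (digits ++ ["2"])
    else solutionLoop (PySem.Int.floordiv n 3 - 1) (digits ++ ["4"])
  else digits
termination_by n.toNat
decreasing_by
  · exact pv_fd_lt n h
  · exact pv_fd_lt n h
  · exact pv_fd1_lt n h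

def solution_alt (n : Int) : String := String.join (solutionLoop n []).reverse

-- ===== PRECONDITION & SPEC =====
def Spec_solution (n : Int) (out : String) : Prop := out = solution_alt n
instance (n : Int) (out : String) : Decidable (Spec_solution n out) := by unfold Spec_solution; infer_instance

-- ===== CLAIM (what is proved, stated in full; the proofs are below) =====
def Claim_equal_solution : Prop := ∀ (n : Int), Dom_solution n → Spec_solution n (solution n)

-- ===== LEMMAS AND PROOFS =====

theorem pv_join_snoc (l : List String) (s : String) :
    String.join (l ++ [s]) = String.join l ++ s := by
  simp [String.join, List.foldl_append]

-- the accumulator factors out of the loop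
theorem pv_loop_acc (n : Int) (acc : List String) :
    solutionLoop n acc = acc ++ solutionLoop n [] := by
  by_cases h : n > 0
  · conv_lhs => rw [solutionLoop]
    conv_rhs => rw [solutionLoop]
    simp only [h, dif_pos]
    split_ifs with h1 h2
    · rw [pv_loop_acc (PySem.Int.floordiv n 3) (acc ++ ["1"]),
        pv_loop_acc (PySem.Int.floordiv n 3) ([] ++ ["1"])]
      simp
    · rw [pv_loop_acc (PySem.Int.floordiv n 3) (acc ++ ["2"]),
        pv_loop_acc (PySem.Int.floordiv n 3) ([] ++ ["2"])]
      simp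
    · rw [pv_loop_acc (PySem.Int.floordiv n 3 - 1) (acc ++ ["4"]),
        pv_loop_acc (PySem.Int.floordiv n 3 - 1) ([] ++ ["4"])]
      simp
  · conv_lhs => rw [solutionLoop]
    conv_rhs => rw [solutionLoop]
    simp [h]
termination_by n.toNat
decreasing_by
  · exact pv_fd_lt n h
  · exact pv_fd_lt n h
  · exact pv_fd_lt n h
  · exact pv_fd_lt n h
  · exact pv_fd1_lt n h
  · exact pv_fd1_lt n h

theorem pv_main (n : Int) : solution n = solution_alt n := by
  by_cases h : n > 0
  · have h0 : 0 ≤ PySem.Int.mod n 3 := PySem.Int.mod_nonneg n (by norm_num)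
    have h3 : PySem.Int.mod n 3 < 3 := PySem.Int.mod_lt n (by norm_num)
    rw [solution]
    simp only [h, dif_pos]
    unfold solution_alt
    rw [solutionLoop]
    simp only [h, dif_pos]
    rcases (by omega : PySem.Int.mod n 3 = 0 ∨ PySem.Int.mod n 3 = 1 ∨ PySem.Int.mod n 3 = 2) with hm | hm | hm
    · rw [if_neg (by omega : ¬ PySem.Int.mod n 3 > 0), if_pos hm,
        if_neg (by omega : ¬ PySem.Int.mod n 3 = 1), if_neg (by omega : ¬ PySem.Int.mod n 3 = 2),
        List.nil_append, pv_loop_acc (PySem.Int.floordiv n 3 - 1) ["4"]]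
      simp only [List.reverse_append, List.reverse_cons, List.reverse_nil, List.nil_append,
        pv_join_snoc]
      rw [pv_main (PySem.Int.floordiv n 3 - 1)]
      rfl
    · rw [if_pos (by omega : PySem.Int.mod n 3 > 0), if_neg (by omega : ¬ PySem.Int.mod n 3 = 0),
        if_pos hm, if_pos hm,
        List.nil_append, pv_loop_acc (PySem.Int.floordiv n 3) ["1"]]
      simp only [List.reverse_append, List.reverse_cons, List.reverse_nil, List.nil_append,
        pv_join_snoc]
      rw [pv_main (PySem.Int.floordiv n 3)]
      rfl
    · rw [if_pos (by omega : PySem.Int.mod n 3 > 0), if_neg (by omega : ¬ PySem.Int.mod n 3 = 0),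
        if_neg (by omega : ¬ PySem.Int.mod n 3 = 1), if_neg (by omega : ¬ PySem.Int.mod n 3 = 1),
        if_pos hm,
        List.nil_append, pv_loop_acc (PySem.Int.floordiv n 3) ["2"]]
      simp only [List.reverse_append, List.reverse_cons, List.reverse_nil, List.nil_append,
        pv_join_snoc]
      rw [pv_main (PySem.Int.floordiv n 3)]
      rfl
  · rw [solution]
    unfold solution_alt
    rw [solutionLoop]
    simp [h, String.join]
termination_by n.toNat
decreasing_by
  · exact pv_fd1_lt n h
  · exact pv_fd_lt n h
  · exact pv_fd_lt n h

-- ===== VERDICT (by name: the statement is the Claim_ definition above) =====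
theorem solution_spec : Claim_equal_solution := by
  intro n _
  unfold Spec_solution
  exact pv_main n
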